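-- pv_equiv track=rewrite | github.com/etcircle/dev-workspace-mcp | dev_workspace_mcp/gittools/service.py | _map_change_type
-- ===== SOURCE A (Python) =====
-- def _map_change_type(status_code: str) -> str:
--     if status_code == "??":
--         return "untracked"
--     significant = [char for char in status_code if char not in {" ", "?"}]
--     if not significant:
--         return "unknown"
--     if any(char == "R" for char in significant):
--         return "renamed"
--     if any(char == "C" for char in significant):
--         return "copied"
--     if any(char == "A" for char in significant):
--         return "added"
--     if any(char == "D" for char in significant):
--         return "deleted"
--     if any(char == "M" for char in significant):
--         return "modified"
--     return "unknown"
-- ===== SOURCE B (Python) =====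
-- _RANK = {"R": 0, "C": 1, "A": 2, "D": 3, "M": 4}
-- _LABELS = ["renamed", "copied", "added", "deleted", "modified"]
--
--
-- def _map_change_type(status_code: str) -> str:
--     if status_code == "??":
--         return "untracked"
--     seen = False
--     best = 5
--     for ch in status_code:
--         if ch == " " or ch == "?":
--             continue
--         seen = True
--         r = _RANK.get(ch, 5)
--         if r < best:
--             best = r
--     if not seen:
--         return "unknown"
--     return _LABELS[best] if best < 5 else "unknown"
-- ===== Notes on version B (the rewrite author's own statement) =====
-- stated objective: faster
-- what changed: Replaces the intermediate filtered list plus five separate any()-scans with a single pass over the characters tracking the minimum priority rank of recognized letters via a rank table.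
import Mathlib
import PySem

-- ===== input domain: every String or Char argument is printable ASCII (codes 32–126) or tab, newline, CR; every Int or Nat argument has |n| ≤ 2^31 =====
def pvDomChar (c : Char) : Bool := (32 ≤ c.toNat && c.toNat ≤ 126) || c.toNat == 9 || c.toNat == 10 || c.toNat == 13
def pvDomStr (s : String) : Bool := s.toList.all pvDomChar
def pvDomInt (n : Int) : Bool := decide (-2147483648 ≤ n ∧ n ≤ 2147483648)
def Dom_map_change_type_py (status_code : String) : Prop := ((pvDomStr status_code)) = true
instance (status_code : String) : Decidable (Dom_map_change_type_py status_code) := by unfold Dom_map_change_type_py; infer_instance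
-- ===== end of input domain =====

-- B replaces A's filtered list plus five any()-scans with one pass tracking the minimum
-- priority rank of recognized letters (objective: alternative single-pass formulation).

-- ===== PORT A =====
def map_change_type_py (status_code : String) : String :=
  if status_code = "??" then "untracked"
  else
    let significant := status_code.toList.filter (fun c => ¬ (c = ' ' ∨ c = '?'))
    if significant = [] then "unknown"
    else if significant.any (fun c => c = 'R') then "renamed"
    else if significant.any (fun c => c = 'C') then "copied"
    else if significant.any (fun c => c = 'A') then "added"
    else if significant.any (fun c => c = 'D') then "deleted"
    else if significant.any (fun c => c = 'M') then "modified"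
    else "unknown"

-- ===== PORT B =====
-- rank table _RANK.get(ch, 5)
def pvRank (c : Char) : Nat :=
  if c = 'R' then 0 else if c = 'C' then 1 else if c = 'A' then 2
  else if c = 'D' then 3 else if c = 'M' then 4 else 5

def pvLabels : List String := ["renamed", "copied", "added", "deleted", "modified"]

def map_change_type_py_alt (status_code : String) : String :=
  if status_code = "??" then "untracked"
  else
    let st := status_code.toList.foldl
      (fun (p : Bool × Nat) ch =>
        if ch = ' ' ∨ ch = '?' then p
        else (true, if pvRank ch < p.2 then pvRank ch else p.2))
      (false, 5)
    if st.1 = false then "unknown"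
    else if st.2 < 5 then pvLabels.getD st.2 "unknown"
    else "unknown"

-- ===== PRECONDITION & SPEC =====
def Spec_map_change_type_py (status_code : String) (out : String) : Prop := out = map_change_type_py_alt status_code
instance (status_code : String) (out : String) : Decidable (Spec_map_change_type_py status_code out) := by unfold Spec_map_change_type_py; infer_instance

-- ===== CLAIM (what is proved, stated in full; the proofs are below) =====
def Claim_equal_map_change_type_py : Prop := ∀ (status_code : String), Dom_map_change_type_py status_code → Spec_map_change_type_py status_code (map_change_type_py status_code)

-- ===== LEMMAS AND PROOFS =====

def pvStep (p : Bool × Nat) (ch : Char) : Bool × Nat :=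
  if ch = ' ' ∨ ch = '?' then p
  else (true, if pvRank ch < p.2 then pvRank ch else p.2)

def pvBest (l : List Char) (b : Nat) : Nat :=
  l.foldl (fun b c => if pvRank c < b then pvRank c else b) b

-- the fold factors through the filtered list
theorem fold_eq_filter (l : List Char) (seen : Bool) (b : Nat) :
    l.foldl pvStep (seen, b)
      = ((seen || !(l.filter (fun c => ¬ (c = ' ' ∨ c = '?'))).isEmpty),
         pvBest (l.filter (fun c => ¬ (c = ' ' ∨ c = '?'))) b) := by
  induction l generalizing seen b with
  | nil => simp [pvBest]
  | cons c rest ih =>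
    by_cases h : c = ' ' ∨ c = '?'
    · have h' : ¬(¬c = ' ' ∧ ¬c = '?') := by tauto
      simp [pvStep, h, ih, pvBest, h']
    · have h' : (¬c = ' ' ∧ ¬c = '?') := by tauto
      simp [pvStep, h, ih, pvBest, h']

theorem pvBest_le_init (l : List Char) (b : Nat) : pvBest l b ≤ b := by
  induction l generalizing b with
  | nil => simp [pvBest]
  | cons c rest ih =>
    simp only [pvBest, List.foldl_cons]
    exact le_trans (ih _) (by split <;> omega)

theorem pvBest_le_mem (l : List Char) (b : Nat) (c : Char) (hc : c ∈ l) :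
    pvBest l b ≤ pvRank c := by
  induction l generalizing b with
  | nil => cases hc
  | cons d rest ih =>
    simp only [pvBest, List.foldl_cons]
    rcases List.mem_cons.1 hc with h | h
    · subst h
      exact le_trans (pvBest_le_init _ _) (by split <;> omega)
    · exact ih _ h

theorem pvBest_cases (l : List Char) (b : Nat) :
    pvBest l b = b ∨ ∃ c ∈ l, pvBest l b = pvRank c := by
  induction l generalizing b with
  | nil => left; simp [pvBest]
  | cons d rest ih =>
    simp only [pvBest, List.foldl_cons]
    rcases ih (if pvRank d < b then pvRank d else b) with h | ⟨c, hc, h⟩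
    · by_cases hd : pvRank d < b
      · right; exact ⟨d, List.mem_cons_self, by simpa [hd] using h⟩
      · left; simpa [hd] using h
    · right; exact ⟨c, List.mem_cons_of_mem _ hc, h⟩

theorem rank_eq (c : Char) (k : Nat) (hk : k < 5) :
    pvRank c = k ↔ (k = 0 ∧ c = 'R') ∨ (k = 1 ∧ c = 'C') ∨ (k = 2 ∧ c = 'A')
      ∨ (k = 3 ∧ c = 'D') ∨ (k = 4 ∧ c = 'M') := by
  unfold pvRank
  split_ifs with h1 h2 h3 h4 h5 <;> subst_vars <;> constructor <;> intro h <;>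
    first
      | omega
      | (rcases h with ⟨h,h'⟩|⟨h,h'⟩|⟨h,h'⟩|⟨h,h'⟩|⟨h,h'⟩ <;> subst_vars <;> simp_all)

-- characterize pvBest on the significant list against the any-chain
theorem main_lemma (sig : List Char) :
    (if sig.any (fun c => c = 'R') then "renamed"
     else if sig.any (fun c => c = 'C') then "copied"
     else if sig.any (fun c => c = 'A') then "added"
     else if sig.any (fun c => c = 'D') then "deleted"
     else if sig.any (fun c => c = 'M') then "modified"
     else "unknown")
    = (if pvBest sig 5 < 5 then pvLabels.getD (pvBest sig 5) "unknown" else "unknown") := by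
  have hle := pvBest_le_init sig 5
  have hcases := pvBest_cases sig 5
  by_cases hR : sig.any (fun c => c = 'R')
  · obtain ⟨c, hc, hc'⟩ := List.any_eq_true.1 hR
    have hcR : c = 'R' := by simpa using hc'
    have := pvBest_le_mem sig 5 c hc
    have h0 : pvBest sig 5 = 0 := by subst hcR; simp [pvRank] at this; omega
    simp [hR, h0, pvLabels]
  · by_cases hC : sig.any (fun c => c = 'C')
    · obtain ⟨c, hc, hc'⟩ := List.any_eq_true.1 hC
      have hcC : c = 'C' := by simpa using hc'
      have h1 : pvBest sig 5 ≤ 1 := by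
        have := pvBest_le_mem sig 5 c hc; subst hcC; simpa [pvRank] using this
      have hne0 : pvBest sig 5 ≠ 0 := by
        intro h0
        rcases hcases with h | ⟨d, hd, h⟩
        · omega
        · rw [h0] at h
          have := ((rank_eq d 0 (by omega)).1 h.symm)
          simp at this
          exact hR (List.any_eq_true.2 ⟨d, hd, by simp [this]⟩)
      have h1' : pvBest sig 5 = 1 := by omega
      simp [hR, hC, h1', pvLabels]
    · by_cases hA : sig.any (fun c => c = 'A')
      · obtain ⟨c, hc, hc'⟩ := List.any_eq_true.1 hA
        have hcA : c = 'A' := by simpa using hc'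
        have h2 : pvBest sig 5 ≤ 2 := by
          have := pvBest_le_mem sig 5 c hc; subst hcA; simpa [pvRank] using this
        have h2' : pvBest sig 5 = 2 := by
          rcases Nat.lt_or_ge (pvBest sig 5) 2 with hlt | hge
          · exfalso
            rcases hcases with h | ⟨d, hd, h⟩
            · omega
            · have := (rank_eq d (pvBest sig 5) (by omega)).1 h.symm
              rcases this with ⟨_,hd'⟩|⟨_,hd'⟩|⟨hk,_⟩|⟨hk,_⟩|⟨hk,_⟩
              · exact hR (List.any_eq_true.2 ⟨d, hd, by simp [hd']⟩)
              · exact hC (List.any_eq_true.2 ⟨d, hd, by simp [hd']⟩)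
              all_goals omega
          · omega
        simp [hR, hC, hA, h2', pvLabels]
      · by_cases hD : sig.any (fun c => c = 'D')
        · obtain ⟨c, hc, hc'⟩ := List.any_eq_true.1 hD
          have hcD : c = 'D' := by simpa using hc'
          have h3 : pvBest sig 5 ≤ 3 := by
            have := pvBest_le_mem sig 5 c hc; subst hcD; simpa [pvRank] using this
          have h3' : pvBest sig 5 = 3 := by
            rcases Nat.lt_or_ge (pvBest sig 5) 3 with hlt | hge
            · exfalso
              rcases hcases with h | ⟨d, hd, h⟩
              · omega
              · have := (rank_eq d (pvBest sig 5) (by omega)).1 h.symm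
                rcases this with ⟨_,hd'⟩|⟨_,hd'⟩|⟨_,hd'⟩|⟨hk,_⟩|⟨hk,_⟩
                · exact hR (List.any_eq_true.2 ⟨d, hd, by simp [hd']⟩)
                · exact hC (List.any_eq_true.2 ⟨d, hd, by simp [hd']⟩)
                · exact hA (List.any_eq_true.2 ⟨d, hd, by simp [hd']⟩)
                all_goals omega
            · omega
          simp [hR, hC, hA, hD, h3', pvLabels]
        · by_cases hM : sig.any (fun c => c = 'M')
          · obtain ⟨c, hc, hc'⟩ := List.any_eq_true.1 hM
            have hcM : c = 'M' := by simpa using hc'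
            have h4 : pvBest sig 5 ≤ 4 := by
              have := pvBest_le_mem sig 5 c hc; subst hcM; simpa [pvRank] using this
            have h4' : pvBest sig 5 = 4 := by
              rcases Nat.lt_or_ge (pvBest sig 5) 4 with hlt | hge
              · exfalso
                rcases hcases with h | ⟨d, hd, h⟩
                · omega
                · have := (rank_eq d (pvBest sig 5) (by omega)).1 h.symm
                  rcases this with ⟨_,hd'⟩|⟨_,hd'⟩|⟨_,hd'⟩|⟨_,hd'⟩|⟨hk,_⟩
                  · exact hR (List.any_eq_true.2 ⟨d, hd, by simp [hd']⟩)
                  · exact hC (List.any_eq_true.2 ⟨d, hd, by simp [hd']⟩)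
                  · exact hA (List.any_eq_true.2 ⟨d, hd, by simp [hd']⟩)
                  · exact hD (List.any_eq_true.2 ⟨d, hd, by simp [hd']⟩)
                  · omega
              · omega
            simp [hR, hC, hA, hD, hM, h4', pvLabels]
          · have h5 : pvBest sig 5 = 5 := by
              rcases Nat.lt_or_ge (pvBest sig 5) 5 with hlt | hge
              · exfalso
                rcases hcases with h | ⟨d, hd, h⟩
                · omega
                · have := (rank_eq d (pvBest sig 5) hlt).1 h.symm
                  rcases this with ⟨_,hd'⟩|⟨_,hd'⟩|⟨_,hd'⟩|⟨_,hd'⟩|⟨_,hd'⟩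
                  · exact hR (List.any_eq_true.2 ⟨d, hd, by simp [hd']⟩)
                  · exact hC (List.any_eq_true.2 ⟨d, hd, by simp [hd']⟩)
                  · exact hA (List.any_eq_true.2 ⟨d, hd, by simp [hd']⟩)
                  · exact hD (List.any_eq_true.2 ⟨d, hd, by simp [hd']⟩)
                  · exact hM (List.any_eq_true.2 ⟨d, hd, by simp [hd']⟩)
              · omega
            simp [hR, hC, hA, hD, hM, h5]

-- ===== VERDICT (by name: the statement is the Claim_ definition above) =====
theorem map_change_type_py_spec : Claim_equal_map_change_type_py := by
  intro s _
  unfold Spec_map_change_type_py map_change_type_py map_change_type_py_alt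
  by_cases hq : s = "??"
  · simp [hq]
  · simp only [hq, if_false]
    have hfold := fold_eq_filter s.toList false 5
    simp only [Bool.false_or] at hfold
    set sig := s.toList.filter (fun c => ¬ (c = ' ' ∨ c = '?')) with hsig
    have hfold' : s.toList.foldl
        (fun (p : Bool × Nat) ch =>
          if ch = ' ' ∨ ch = '?' then p
          else (true, if pvRank ch < p.2 then pvRank ch else p.2)) (false, 5)
        = (!sig.isEmpty, pvBest sig 5) := by
      simpa [pvStep] using hfold
    rw [hfold']
    by_cases he : sig = []
    · simp [he]
    · simp only [he, if_false]
      have hne : (!sig.isEmpty) = true := by simp [he]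
      rw [hne]
      simpa using main_lemma sig
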